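-- pv_equiv track=rewrite | github.com/udaydomadiya08/vantix | ytvideo/video.py | trim_tags
-- ===== SOURCE A (Python) =====
-- def trim_tags(tags, max_length=490):
--     final_tags = []
--     total_len = 0
--     for tag in tags:
--         if total_len + len(tag) + 2 <= max_length:
--             final_tags.append(tag)
--             total_len += len(tag) + 2  # +2 for comma and space
--         else:
--             break
--     return final_tags
-- ===== SOURCE B (Python) =====
-- def trim_tags(tags, max_length=490):
--     # Stage 1: prefix sums of the costs len(tag)+2 (strictly increasing,
--     # since every cost is >= 2).
--     prefixes = []
--     total = 0
--     for t in tags: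
--         total += len(t) + 2
--         prefixes.append(total)
--     # Stage 2: binary search for the number of prefix sums <= max_length
--     # (valid because `prefixes` is sorted); that count is exactly how many
--     # leading tags fit, so one slice yields the answer.
--     lo, hi = 0, len(prefixes)
--     while lo < hi:
--         mid = (lo + hi) // 2
--         if prefixes[mid] <= max_length:
--             lo = mid + 1
--         else:
--             hi = mid
--     return tags[:lo]
-- ===== Notes on version B (the rewrite author's own statement) =====
-- stated objective: alternative
-- what changed: Replaces A's single accumulate-and-break loop by a two-stage algorithm: build the (strictly increasing) prefix-sum list of tag costs, then binary-search it for the count of prefixes within the budget and return one slice tags[:count].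
import Mathlib
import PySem

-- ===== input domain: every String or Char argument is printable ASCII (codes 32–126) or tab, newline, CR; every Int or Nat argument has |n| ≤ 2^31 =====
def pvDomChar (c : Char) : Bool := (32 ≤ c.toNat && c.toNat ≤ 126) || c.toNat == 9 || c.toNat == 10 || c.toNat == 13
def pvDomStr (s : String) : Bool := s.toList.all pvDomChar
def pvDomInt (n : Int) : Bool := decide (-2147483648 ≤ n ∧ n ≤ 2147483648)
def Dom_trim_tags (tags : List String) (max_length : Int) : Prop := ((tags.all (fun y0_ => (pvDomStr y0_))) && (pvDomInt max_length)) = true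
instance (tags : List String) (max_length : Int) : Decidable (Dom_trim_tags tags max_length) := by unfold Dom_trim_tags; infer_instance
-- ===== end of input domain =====

-- B builds the prefix-sum list of tag costs and binary-searches it for the count within
-- budget (alternative two-stage algorithm, same result as A's accumulate-and-break loop).

-- ===== PORT A =====
-- the for-loop with break: state = (final_tags, total_len)
def trimA_loop (rest : List String) (final_tags : List String) (total_len : Int) (max_length : Int) : List String :=
  match rest with
  | [] => final_tags
  | tag :: rest' =>
      if total_len + (PySem.Str.len tag) + 2 ≤ max_length then
        trimA_loop rest' (final_tags ++ [tag]) (total_len + (PySem.Str.len tag) + 2) max_length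
      else final_tags

def trim_tags (tags : List String) (max_length : Int) : List String :=
  trimA_loop tags [] 0 max_length

-- ===== PORT B =====
-- Stage 1 of Source B: the append loop building the prefix sums of len(t)+2
def prefLoop (rest : List String) (total : Int) : List Int :=
  match rest with
  | [] => []
  | t :: rest' => (total + PySem.Str.len t + 2) :: prefLoop rest' (total + PySem.Str.len t + 2)

-- Stage 2 of Source B: the binary-search while-loop; prefixes[mid] is always in range
-- (0 ≤ mid < hi ≤ len), so the index access is ported exactly as getD.
def bsearch (prefixes : List Int) (max_length : Int) (lo hi : Nat) : Nat :=
  if _h : lo < hi then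
    let mid := (lo + hi) / 2
    if prefixes.getD mid 0 ≤ max_length then bsearch prefixes max_length (mid + 1) hi
    else bsearch prefixes max_length lo mid
  else lo
termination_by hi - lo
decreasing_by all_goals omega

def trim_tags_alt (tags : List String) (max_length : Int) : List String :=
  tags.take (bsearch (prefLoop tags 0) max_length 0 (prefLoop tags 0).length)

-- ===== PRECONDITION & SPEC =====
def Spec_trim_tags (tags : List String) (max_length : Int) (out : List String) : Prop := out = trim_tags_alt tags max_length
instance (tags : List String) (max_length : Int) (out : List String) : Decidable (Spec_trim_tags tags max_length out) := by unfold Spec_trim_tags; infer_instance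

-- ===== CLAIM (what is proved, stated in full; the proofs are below) =====
def Claim_equal_trim_tags : Prop := ∀ (tags : List String) (max_length : Int), Dom_trim_tags tags max_length → Spec_trim_tags tags max_length (trim_tags tags max_length)

-- ===== LEMMAS AND PROOFS =====

-- proof-side spec: how many leading tags fit (characterises both ports)
def kSpec (rest : List String) (budget : Int) : Nat :=
  match rest with
  | [] => 0
  | tag :: rest' =>
      if budget - (PySem.Str.len tag) - 2 < 0 then 0
      else kSpec rest' (budget - (PySem.Str.len tag) - 2) + 1

theorem prefLoop_length (rest : List String) (s : Int) :
    (prefLoop rest s).length = rest.length := by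
  induction rest generalizing s with
  | nil => simp [prefLoop]
  | cons t r ih => simp [prefLoop, ih]

theorem prefLoop_lb (rest : List String) (s : Int) :
    ∀ x ∈ prefLoop rest s, s ≤ x := by
  induction rest generalizing s with
  | nil => simp [prefLoop]
  | cons t r ih =>
      intro x hx
      simp only [prefLoop, List.mem_cons] at hx
      have hlen : (0:Int) ≤ PySem.Str.len t := by
        simp [PySem.Str.len]
      rcases hx with h | h
      · omega
      · have := ih (s + PySem.Str.len t + 2) x h
        omega

theorem prefLoop_mono (rest : List String) (s : Int) :
    ∀ i j, i ≤ j → j < rest.length →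
      (prefLoop rest s).getD i 0 ≤ (prefLoop rest s).getD j 0 := by
  induction rest generalizing s with
  | nil => intro i j _ hj; simp at hj
  | cons t r ih =>
      intro i j hij hj
      match i, j with
      | 0, 0 => exact le_refl _
      | 0, j + 1 =>
          simp only [prefLoop, List.getD_cons_zero, List.getD_cons_succ]
          have hjlen : j < r.length := by simpa using hj
          have hjl : j < (prefLoop r (s + PySem.Str.len t + 2)).length := by
            rw [prefLoop_length]; exact hjlen
          rw [List.getD_eq_getElem _ _ hjl]
          exact prefLoop_lb _ _ _ (List.getElem_mem hjl)
      | i + 1, j + 1 =>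
          simp only [prefLoop, List.getD_cons_succ]
          exact ih _ i j (by omega) (by simpa using hj)

-- kSpec characterises the fit count via the prefix sums
theorem kSpec_char (rest : List String) (s m : Int) :
    kSpec rest (m - s) ≤ rest.length ∧
    (∀ i < kSpec rest (m - s), (prefLoop rest s).getD i 0 ≤ m) ∧
    (kSpec rest (m - s) < rest.length → ¬ (prefLoop rest s).getD (kSpec rest (m - s)) 0 ≤ m) := by
  induction rest generalizing s with
  | nil => simp [kSpec]
  | cons t r ih =>
      simp only [kSpec, prefLoop]
      by_cases h : m - s - PySem.Str.len t - 2 < 0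
      · rw [if_pos h]
        refine ⟨by simp, by simp, ?_⟩
        intro _
        simp only [List.getD_cons_zero]
        omega
      · rw [if_neg h]
        have heq : m - s - PySem.Str.len t - 2 = m - (s + PySem.Str.len t + 2) := by ring
        rw [heq]
        obtain ⟨h1, h2, h3⟩ := ih (s + PySem.Str.len t + 2)
        refine ⟨by simp only [List.length_cons]; exact Nat.succ_le_succ h1, ?_, ?_⟩
        · intro i hi
          match i with
          | 0 => simp only [List.getD_cons_zero]; omega
          | i + 1 =>
              simp only [List.getD_cons_succ]
              exact h2 i (by omega)
        · intro hlt
          simp only [List.getD_cons_succ]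
          exact h3 (by simpa using hlt)

-- binary-search correctness on a monotone list
theorem bsearch_char (l : List Int) (m : Int)
    (hmono : ∀ i j, i ≤ j → j < l.length → l.getD i 0 ≤ l.getD j 0) :
    ∀ fuel lo hi, hi - lo ≤ fuel → lo ≤ hi → hi ≤ l.length →
    (∀ i < lo, l.getD i 0 ≤ m) →
    (∀ i, hi ≤ i → i < l.length → ¬ l.getD i 0 ≤ m) →
    (∀ i < bsearch l m lo hi, l.getD i 0 ≤ m) ∧
    bsearch l m lo hi ≤ l.length ∧
    (bsearch l m lo hi < l.length → ¬ l.getD (bsearch l m lo hi) 0 ≤ m) := by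
  intro fuel
  induction fuel with
  | zero =>
      intro lo hi hfuel hle hhi hlow hhigh
      have : lo = hi := by omega
      subst this
      rw [bsearch]
      simp only [lt_irrefl, dite_false]
      exact ⟨hlow, by omega, fun h => hhigh lo (le_refl _) h⟩
  | succ n ih =>
      intro lo hi hfuel hle hhi hlow hhigh
      rw [bsearch]
      by_cases h : lo < hi
      · rw [dif_pos h]
        simp only
        by_cases hm : l.getD ((lo + hi) / 2) 0 ≤ m
        · rw [if_pos hm]
          apply ih ((lo + hi) / 2 + 1) hi (by omega) (by omega) hhi
          · intro i hi2
            exact hmono i ((lo + hi) / 2) (by omega) (by omega) |>.trans hm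
          · exact hhigh
        · rw [if_neg hm]
          apply ih lo ((lo + hi) / 2) (by omega) (by omega) (by omega) hlow
          · intro i hmid hilen hle2
            exact hm ((hmono ((lo + hi) / 2) i hmid hilen).trans hle2)
      · rw [dif_neg h]
        have : lo = hi := by omega
        subst this
        exact ⟨hlow, by omega, fun hlt => hhigh lo (le_refl _) hlt⟩

-- the two characterisations pin the same number
theorem bsearch_eq_kSpec (tags : List String) (m : Int) :
    bsearch (prefLoop tags 0) m 0 (prefLoop tags 0).length = kSpec tags m := by
  have hlen := prefLoop_length tags 0
  have hmono : ∀ i j, i ≤ j → j < (prefLoop tags 0).length →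
      (prefLoop tags 0).getD i 0 ≤ (prefLoop tags 0).getD j 0 := by
    intro i j hij hj
    exact prefLoop_mono tags 0 i j hij (by omega)
  obtain ⟨b1, b2, b3⟩ := bsearch_char (prefLoop tags 0) m hmono
    (prefLoop tags 0).length 0 (prefLoop tags 0).length (le_refl _) (by omega) (le_refl _)
    (by omega) (by omega)
  have hk := kSpec_char tags 0 m
  rw [show m - 0 = m by ring] at hk
  obtain ⟨k1, k2, k3⟩ := hk
  set r := bsearch (prefLoop tags 0) m 0 (prefLoop tags 0).length with hr
  by_contra hne
  rcases Nat.lt_or_ge r (kSpec tags m) with hlt | hge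
  · exact b3 (by omega) (k2 r hlt)
  · have hlt : kSpec tags m < r := by omega
    exact k3 (by omega) (b1 _ hlt)

theorem kSpec_shift_take (rest : List String) (acc : List String) (total m : Int) :
    trimA_loop rest acc total m = acc ++ rest.take (kSpec rest (m - total)) := by
  induction rest generalizing acc total with
  | nil => simp [trimA_loop, kSpec]
  | cons tag rest' ih =>
      simp only [trimA_loop, kSpec]
      by_cases h : total + PySem.Str.len tag + 2 ≤ m
      · have h' : ¬ (m - total - PySem.Str.len tag - 2 < 0) := by omega
        rw [if_pos h, if_neg h', ih,
            show m - total - PySem.Str.len tag - 2 = m - (total + PySem.Str.len tag + 2) by ring,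
            List.take_succ_cons]
        simp
      · have h' : m - total - PySem.Str.len tag - 2 < 0 := by omega
        rw [if_neg h, if_pos h']
        simp

-- ===== VERDICT (by name: the statement is the Claim_ definition above) =====
theorem trim_tags_spec : Claim_equal_trim_tags := by
  intro tags m _
  unfold Spec_trim_tags trim_tags trim_tags_alt
  rw [kSpec_shift_take, bsearch_eq_kSpec]
  simp [show m - 0 = m by ring]
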